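-- pv_equiv track=rewrite | github.com/rabumaabraham/DSA-UC-San-Diego | phiX174_error_prone_overlap.py | compute_char_classes
-- ===== SOURCE A (Python) =====
-- def compute_char_classes(string, order):
--     char_class = [0] * len(string)
--     char_class[order[0]] = 0
--     for i in range(1, len(string)):
--         if string[order[i]] != string[order[i - 1]]:
--             char_class[order[i]] = char_class[order[i - 1]] + 1
--         else:
--             char_class[order[i]] = char_class[order[i - 1]]
--     return char_class
-- ===== SOURCE B (Python) =====
-- def compute_char_classes(string, order):
--     n = len(string)
--     chars = [string[o] for o in order[:n]]
--     # positions in sorted order where a new character run begins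
--     boundaries = [i for i in range(1, n) if chars[i] != chars[i - 1]]
--     char_class = [0] * n
--     for i, o in enumerate(order[:n]):
--         # class of sorted position i = number of boundaries <= i  (binary search)
--         lo, hi = 0, len(boundaries)
--         while lo < hi:
--             mid = (lo + hi) // 2
--             if boundaries[mid] <= i:
--                 lo = mid + 1
--             else:
--                 hi = mid
--         char_class[o] = lo
--     return char_class
-- ===== Notes on version B (the rewrite author's own statement) =====
-- stated objective: alternative
-- what changed: Replaces A's sequential running-counter loop (which reads the current rank back out of the partially written result array) by an offline algorithm: collect the list of run-boundary positions in sorted order, then compute each position's class independently as the number of boundaries at or before it via binary search, so no state flows from one iteration to the next.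
import Mathlib
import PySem

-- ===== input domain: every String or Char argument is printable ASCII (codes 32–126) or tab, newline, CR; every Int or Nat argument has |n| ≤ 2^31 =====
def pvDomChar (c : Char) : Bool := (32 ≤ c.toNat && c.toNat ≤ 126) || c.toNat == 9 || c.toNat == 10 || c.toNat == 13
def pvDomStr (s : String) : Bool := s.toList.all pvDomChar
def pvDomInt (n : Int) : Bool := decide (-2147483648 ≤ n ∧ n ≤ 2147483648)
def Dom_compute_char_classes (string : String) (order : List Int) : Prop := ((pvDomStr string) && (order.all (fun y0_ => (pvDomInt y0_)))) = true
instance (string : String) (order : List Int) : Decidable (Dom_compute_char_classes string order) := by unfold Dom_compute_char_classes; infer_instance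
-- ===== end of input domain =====

-- B replaces A's sequential running-counter loop by an offline algorithm: collect the
-- run-boundary positions of the sorted order, then compute each class independently as
-- the number of boundaries at or before that sorted position, via binary search.

-- ===== PORT A =====
def compute_char_classes (string : String) (order : List Int) : List Int :=
  let s := string.toList
  let char_class1 :=
    PySem.List.pySetD (List.replicate s.length (0 : Int)) (PySem.List.pyGetD order 0 0) 0
  (PySem.List.pyRange 1 (s.length : Int) 1).foldl
    (fun char_class i =>
      if PySem.List.pyGetD s (PySem.List.pyGetD order i 0) ' '
          ≠ PySem.List.pyGetD s (PySem.List.pyGetD order (i - 1) 0) ' ' then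
        PySem.List.pySetD char_class (PySem.List.pyGetD order i 0)
          (PySem.List.pyGetD char_class (PySem.List.pyGetD order (i - 1) 0) 0 + 1)
      else
        PySem.List.pySetD char_class (PySem.List.pyGetD order i 0)
          (PySem.List.pyGetD char_class (PySem.List.pyGetD order (i - 1) 0) 0))
    char_class1

-- ===== PORT B =====
-- Source B's hand-written upper-bound binary search (while lo < hi …); lo/hi are the
-- always-nonnegative Python ints, carried as Nat (mid = (lo+hi)//2 = Nat division here).
def pvBsr (bnd : List Int) (i : Int) (lo hi : Nat) : Nat :=
  if _h : lo < hi then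
    if bnd.getD ((lo + hi) / 2) 0 ≤ i then pvBsr bnd i ((lo + hi) / 2 + 1) hi
    else pvBsr bnd i lo ((lo + hi) / 2)
  else lo
termination_by hi - lo
decreasing_by all_goals omega

def compute_char_classes_alt (string : String) (order : List Int) : List Int :=
  let s := string.toList
  let n := s.length
  let chars := (PySem.List.slice order none (some (n : Int))).map
    (fun o => PySem.List.pyGetD s o ' ')
  let boundaries := (PySem.List.pyRange 1 (n : Int) 1).filter
    (fun i => decide (PySem.List.pyGetD chars i ' ' ≠ PySem.List.pyGetD chars (i - 1) ' '))
  (PySem.List.enumerate (PySem.List.slice order none (some (n : Int)))).foldl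
    (fun cc io => PySem.List.pySetD cc io.2 ((pvBsr boundaries io.1 0 boundaries.length : Nat) : Int))
    (List.replicate n (0 : Int))

-- ===== PRECONDITION & SPEC =====
-- Exactly the inputs on which Python A returns: a nonempty string, order supplying at least
-- len(string) entries, each used entry a valid (possibly negative) index into the string.
def Pre_compute_char_classes (string : String) (order : List Int) : Prop :=
  string.toList ≠ [] ∧ string.toList.length ≤ order.length ∧
    ∀ x ∈ order.take string.toList.length, PySem.Raise.InRange string.toList.length x
instance (string : String) (order : List Int) : Decidable (Pre_compute_char_classes string order) := by
  unfold Pre_compute_char_classes; infer_instance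

def pvWitness_compute_char_classes : String × List Int := ("aba", [0, 2, 1])

def Spec_compute_char_classes (string : String) (order : List Int) (out : List Int) : Prop :=
  out = compute_char_classes_alt string order
instance (string : String) (order : List Int) (out : List Int) : Decidable (Spec_compute_char_classes string order out) := by
  unfold Spec_compute_char_classes; infer_instance

-- ===== CLAIM (what is proved, stated in full; the proofs are below) =====
def Claim_equal_compute_char_classes : Prop := ∀ (string : String) (order : List Int), Dom_compute_char_classes string order → Pre_compute_char_classes string order → Spec_compute_char_classes string order (compute_char_classes string order)

-- ===== LEMMAS AND PROOFS =====

-- the character of the i-th position in sorted order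
def pvKey (s : List Char) (ord : List Int) (i : Nat) : Char :=
  PySem.List.pyGetD s (ord.getD i 0) ' '

-- the equivalence-class rank of the i-th position in sorted order
def pvCls (key : Nat → Char) : Nat → Int
  | 0 => 0
  | i + 1 => pvCls key i + (if key (i + 1) ≠ key i then 1 else 0)

-- ranks cl 0, …, cl (k-1) scattered onto an all-zero array of length n
def pvScatter (n : Nat) (ord : List Int) (cl : Nat → Int) (k : Nat) : List Int :=
  (List.range k).foldl (fun cc i => PySem.List.pySetD cc (ord.getD i 0) (cl i))
    (List.replicate n 0)

lemma pvScatter_succ (n : Nat) (ord : List Int) (cl : Nat → Int) (k : Nat) :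
    pvScatter n ord cl (k + 1)
      = PySem.List.pySetD (pvScatter n ord cl k) (ord.getD k 0) (cl k) := by
  simp [pvScatter, List.range_succ]

lemma pvScatter_length (n : Nat) (ord : List Int) (cl : Nat → Int) (k : Nat) :
    (pvScatter n ord cl k).length = n := by
  induction k with
  | zero => simp [pvScatter]
  | succ k ih => rw [pvScatter_succ, PySem.List.length_pySetD, ih]

lemma pyIdx?_inRange (n : Nat) (i : Int) (h : PySem.Raise.InRange n i) :
    ∃ j, PySem.List.pyIdx? n i = some j ∧ j < n := by
  obtain ⟨h1, h2⟩ := h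
  unfold PySem.List.pyIdx?
  by_cases hp : 0 ≤ i
  · rw [if_pos hp, if_pos (by omega)]
    exact ⟨i.toNat, rfl, by omega⟩
  · rw [if_neg hp, if_pos (by omega)]
    exact ⟨n - (-i).toNat, rfl, by omega⟩

lemma pyGetD_pySetD_self (xs : List Int) (i : Int) (v d : Int)
    (h : PySem.Raise.InRange xs.length i) :
    PySem.List.pyGetD (PySem.List.pySetD xs i v) i d = v := by
  obtain ⟨j, hj, hjn⟩ := pyIdx?_inRange xs.length i h
  simp only [PySem.List.pyGetD, PySem.List.pySetD, PySem.List.pyGet?, PySem.List.pySet?,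
    hj, Option.map_some, Option.getD_some, List.length_set]
  simp [hjn]

lemma pvInRange_getD (s : List Char) (ord : List Int)
    (hlen : s.length ≤ ord.length)
    (hin : ∀ x ∈ ord.take s.length, PySem.Raise.InRange s.length x)
    (i : Nat) (hi : i < s.length) :
    PySem.Raise.InRange s.length (ord.getD i 0) := by
  have hio : i < ord.length := lt_of_lt_of_le hi hlen
  have hmem : ord.getD i 0 ∈ ord.take s.length := by
    have : (ord.take s.length)[i]'(by simp; omega) = ord.getD i 0 := by
      simp [List.getElem_take, List.getD_eq_getElem?_getD, List.getElem?_eq_getElem hio]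
    exact this ▸ List.getElem_mem _
  exact hin _ hmem

-- A's loop computes the scatter of the rank sequence
lemma pvA_loop (s : List Char) (ord : List Int)
    (hlen : s.length ≤ ord.length)
    (hin : ∀ x ∈ ord.take s.length, PySem.Raise.InRange s.length x) :
    ∀ k, 1 ≤ k → k ≤ s.length →
      (PySem.List.pyRange 1 (k : Int) 1).foldl
        (fun char_class i =>
          if PySem.List.pyGetD s (PySem.List.pyGetD ord i 0) ' '
              ≠ PySem.List.pyGetD s (PySem.List.pyGetD ord (i - 1) 0) ' ' then
            PySem.List.pySetD char_class (PySem.List.pyGetD ord i 0)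
              (PySem.List.pyGetD char_class (PySem.List.pyGetD ord (i - 1) 0) 0 + 1)
          else
            PySem.List.pySetD char_class (PySem.List.pyGetD ord i 0)
              (PySem.List.pyGetD char_class (PySem.List.pyGetD ord (i - 1) 0) 0))
        (PySem.List.pySetD (List.replicate s.length (0 : Int)) (PySem.List.pyGetD ord 0 0) 0)
        = pvScatter s.length ord (pvCls (pvKey s ord)) k := by
  intro k
  induction k with
  | zero => omega
  | succ k ih =>
    intro _ hk
    by_cases hk1 : k = 0
    · subst hk1
      rw [show ((1 : Nat) : Int) = 1 by norm_num, PySem.List.pyRange_one_eq_nil (by omega)]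
      simp only [List.foldl_nil]
      have h0 : PySem.List.pyGetD ord (0 : Int) 0 = ord.getD 0 0 := by
        simpa using PySem.List.pyGetD_natCast (xs := ord) (n := 0) (d := 0)
      rw [h0]
      simp [pvScatter, pvCls]
    · have hk1' : 1 ≤ k := by omega
      have hkl : k ≤ s.length := by omega
      have hrange : PySem.List.pyRange 1 ((k + 1 : Nat) : Int) 1
          = PySem.List.pyRange 1 (k : Int) 1 ++ [(k : Int)] := by
        rw [Nat.cast_add_one]
        exact PySem.List.pyRange_one_succ_right (by exact_mod_cast hk1')
      rw [hrange, List.foldl_append, ih hk1' hkl]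
      simp only [List.foldl_cons, List.foldl_nil]
      have hkInt : ((k : Int) - 1) = ((k - 1 : Nat) : Int) := by omega
      have hgk : PySem.List.pyGetD ord ((k : Nat) : Int) 0 = ord.getD k 0 :=
        PySem.List.pyGetD_natCast ..
      have hgk1 : PySem.List.pyGetD ord ((k : Int) - 1) 0 = ord.getD (k - 1) 0 := by
        rw [hkInt]; exact PySem.List.pyGetD_natCast ..
      have hread : PySem.List.pyGetD (pvScatter s.length ord (pvCls (pvKey s ord)) k)
          (ord.getD (k - 1) 0) 0 = pvCls (pvKey s ord) (k - 1) := by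
        have hs : pvScatter s.length ord (pvCls (pvKey s ord)) k
            = PySem.List.pySetD (pvScatter s.length ord (pvCls (pvKey s ord)) (k - 1))
                (ord.getD (k - 1) 0) (pvCls (pvKey s ord) (k - 1)) := by
          rw [← pvScatter_succ]
          congr 1
          omega
        rw [hs]
        exact pyGetD_pySetD_self _ _ _ _
          (by rw [pvScatter_length]; exact pvInRange_getD s ord hlen hin _ (by omega))
      have hcls : pvCls (pvKey s ord) k = pvCls (pvKey s ord) (k - 1)
          + (if pvKey s ord k ≠ pvKey s ord (k - 1) then 1 else 0) := by
        have : k = (k - 1) + 1 := by omega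
        rw [this, pvCls]
        simp
      rw [pvScatter_succ, hgk, hgk1, hread]
      by_cases hne : pvKey s ord k ≠ pvKey s ord (k - 1)
      · rw [if_pos (by simpa [pvKey] using hne)]
        rw [hcls, if_pos hne]
      · rw [if_neg (by simpa [pvKey] using hne)]
        rw [hcls, if_neg hne]
        simp

-- monotone indexing from pairwise-sortedness
lemma pvMono (bnd : List Int) (hs : bnd.Pairwise (· ≤ ·))
    (a b : Nat) (hab : a ≤ b) (hb : b < bnd.length) :
    bnd.getD a 0 ≤ bnd.getD b 0 := by
  rcases eq_or_lt_of_le hab with h | h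
  · subst h; exact le_refl _
  · rw [List.getD_eq_getElem bnd 0 (by omega), List.getD_eq_getElem bnd 0 hb]
    exact List.pairwise_iff_getElem.mp hs a b (by omega) hb h

-- the binary search returns a split point of the ≤-i elements
lemma pvBsr_inv (bnd : List Int) (i : Int) (hs : bnd.Pairwise (· ≤ ·)) :
    ∀ fuel lo hi, hi - lo ≤ fuel → lo ≤ hi → hi ≤ bnd.length →
      (∀ k, k < lo → bnd.getD k 0 ≤ i) →
      (∀ k, hi ≤ k → k < bnd.length → i < bnd.getD k 0) →
      lo ≤ pvBsr bnd i lo hi ∧ pvBsr bnd i lo hi ≤ hi ∧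
      (∀ k, k < pvBsr bnd i lo hi → bnd.getD k 0 ≤ i) ∧
      (∀ k, pvBsr bnd i lo hi ≤ k → k < bnd.length → i < bnd.getD k 0) := by
  intro fuel
  induction fuel with
  | zero =>
    intro lo hi hf hle hhi hlow hhigh
    have : lo = hi := by omega
    subst this
    rw [pvBsr, dif_neg (by omega)]
    exact ⟨le_refl _, le_refl _, hlow, hhigh⟩
  | succ fuel ih =>
    intro lo hi hf hle hhi hlow hhigh
    by_cases h : lo < hi
    · rw [pvBsr, dif_pos h]
      have hmid1 : lo ≤ (lo + hi) / 2 := by omega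
      have hmid2 : (lo + hi) / 2 < hi := by omega
      by_cases hc : bnd.getD ((lo + hi) / 2) 0 ≤ i
      · rw [if_pos hc]
        have hlow' : ∀ k, k < (lo + hi) / 2 + 1 → bnd.getD k 0 ≤ i := by
          intro k hk
          exact le_trans (pvMono bnd hs k ((lo + hi) / 2) (by omega) (by omega)) hc
        have := ih ((lo + hi) / 2 + 1) hi (by omega) (by omega) hhi hlow' hhigh
        exact ⟨by omega, this.2.1, this.2.2.1, this.2.2.2⟩
      · rw [if_neg hc]
        have hhigh' : ∀ k, (lo + hi) / 2 ≤ k → k < bnd.length → i < bnd.getD k 0 := by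
          intro k hk hkl
          exact lt_of_lt_of_le (by omega : i < bnd.getD ((lo + hi) / 2) 0)
            (pvMono bnd hs ((lo + hi) / 2) k hk hkl)
        have := ih lo ((lo + hi) / 2) (by omega) (by omega) (by omega) hlow hhigh'
        exact ⟨this.1, by omega, this.2.2.1, this.2.2.2⟩
    · rw [pvBsr, dif_neg h]
      have : lo = hi := by omega
      subst this
      exact ⟨le_refl _, le_refl _, hlow, hhigh⟩

-- on a sorted list the binary search counts the elements ≤ i
lemma pvBsr_count (bnd : List Int) (i : Int) (hs : bnd.Pairwise (· ≤ ·)) :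
    pvBsr bnd i 0 bnd.length = bnd.countP (fun b => decide (b ≤ i)) := by
  obtain ⟨h1, h2, hlow, hhigh⟩ :=
    pvBsr_inv bnd i hs bnd.length 0 bnd.length (by omega) (by omega) (le_refl _)
      (by intro k hk; omega) (by intro k hk hkl; omega)
  set r := pvBsr bnd i 0 bnd.length with hr
  have hsplit : bnd = bnd.take r ++ bnd.drop r := (List.take_append_drop r bnd).symm
  rw [hsplit, List.countP_append]
  have htake : (bnd.take r).countP (fun b => decide (b ≤ i)) = r := by
    have hall : ∀ a ∈ bnd.take r, (fun b => decide (b ≤ i)) a = true := by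
      intro a ha
      obtain ⟨k, hk, hka⟩ := List.getElem_of_mem ha
      have hk' : k < r := by
        have := hk; simp [List.length_take] at this; omega
      rw [List.getElem_take] at hka
      have hga : bnd.getD k 0 = a := by
        rw [List.getD_eq_getElem bnd 0 (by omega)]; exact hka
      have hai : a ≤ i := hga ▸ hlow k hk'
      simp [hai]
    rw [List.countP_eq_length.mpr hall, List.length_take]
    omega
  have hdrop : (bnd.drop r).countP (fun b => decide (b ≤ i)) = 0 := by
    apply List.countP_eq_zero.mpr
    intro a ha
    obtain ⟨k, hk, hka⟩ := List.getElem_of_mem ha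
    rw [List.getElem_drop] at hka
    have hkl : r + k < bnd.length := by
      have := hk; simp [List.length_drop] at this; omega
    have hga : bnd.getD (r + k) 0 = a := by
      rw [List.getD_eq_getElem bnd 0 hkl]; exact hka
    have hai : i < a := hga ▸ hhigh (r + k) (by omega) hkl
    simp
    omega
  omega

-- B's gathered characters and boundary list, named for the proofs
def pvChars (s : List Char) (ord : List Int) : List Char :=
  (ord.take s.length).map (fun o => PySem.List.pyGetD s o ' ')

def pvBnd (s : List Char) (ord : List Int) : List Int :=
  (PySem.List.pyRange 1 (s.length : Int) 1).filter
    (fun i => decide (PySem.List.pyGetD (pvChars s ord) i ' '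
        ≠ PySem.List.pyGetD (pvChars s ord) (i - 1) ' '))

lemma pvChars_get (s : List Char) (ord : List Int) (hlen : s.length ≤ ord.length)
    (k : Nat) (hk : k < s.length) :
    PySem.List.pyGetD (pvChars s ord) (k : Int) ' ' = pvKey s ord k := by
  rw [PySem.List.pyGetD_natCast]
  have hio : k < ord.length := lt_of_lt_of_le hk hlen
  rw [pvChars, List.getD_eq_getElem?_getD, List.getElem?_map, List.getElem?_take,
    if_pos hk, List.getElem?_eq_getElem hio]
  simp [pvKey, List.getD_eq_getElem?_getD, List.getElem?_eq_getElem hio]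

lemma pvBnd_sorted (s : List Char) (ord : List Int) :
    (pvBnd s ord).Pairwise (· ≤ ·) := by
  exact (List.Pairwise.sublist List.filter_sublist
    (PySem.List.pairwise_lt_pyRange_one 1 (s.length : Int))).imp le_of_lt

-- the boundaries up to sorted position m count exactly the rank of m
lemma pvCnt_range (s : List Char) (ord : List Int) (hlen : s.length ≤ ord.length) :
    ∀ m, m < s.length →
      ((List.countP (fun i => decide (PySem.List.pyGetD (pvChars s ord) i ' '
          ≠ PySem.List.pyGetD (pvChars s ord) (i - 1) ' '))
        (PySem.List.pyRange 1 ((m : Int) + 1) 1) : Nat) : Int) = pvCls (pvKey s ord) m := by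
  intro m
  induction m with
  | zero =>
    intro _
    rw [PySem.List.pyRange_one_eq_nil (by omega)]
    simp [pvCls]
  | succ m ih =>
    intro hm
    rw [show ((m + 1 : Nat) : Int) + 1 = (((m : Int) + 1) + 1) by push_cast; ring,
      PySem.List.pyRange_one_succ_right (by omega), List.countP_append]
    have h1 : PySem.List.pyGetD (pvChars s ord) ((m : Int) + 1) ' ' = pvKey s ord (m + 1) := by
      rw [show ((m : Int) + 1) = ((m + 1 : Nat) : Int) by push_cast; ring]
      exact pvChars_get s ord hlen (m + 1) hm
    have h2 : PySem.List.pyGetD (pvChars s ord) ((m : Int) + 1 - 1) ' ' = pvKey s ord m := by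
      rw [show ((m : Int) + 1 - 1) = ((m : Nat) : Int) by ring]
      exact pvChars_get s ord hlen m (by omega)
    have hsingle : List.countP
        (fun i => decide (PySem.List.pyGetD (pvChars s ord) i ' '
            ≠ PySem.List.pyGetD (pvChars s ord) (i - 1) ' ')) [(m : Int) + 1]
        = if pvKey s ord (m + 1) ≠ pvKey s ord m then 1 else 0 := by
      by_cases hne : pvKey s ord (m + 1) ≠ pvKey s ord m
      · have hd : decide (PySem.List.pyGetD (pvChars s ord) ((m : Int) + 1) ' '
            ≠ PySem.List.pyGetD (pvChars s ord) ((m : Int) + 1 - 1) ' ') = true := by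
          rw [h1, h2]; simpa using hne
        rw [if_pos hne]
        simp only [List.countP_cons, List.countP_nil, hd]
        norm_num
      · have hd : decide (PySem.List.pyGetD (pvChars s ord) ((m : Int) + 1) ' '
            ≠ PySem.List.pyGetD (pvChars s ord) ((m : Int) + 1 - 1) ' ') = false := by
          rw [h1, h2]; simpa using hne
        rw [if_neg hne]
        simp only [List.countP_cons, List.countP_nil, hd]
        norm_num
    rw [hsingle]
    have ihm := ih (by omega)
    rw [show pvCls (pvKey s ord) (m + 1)
        = pvCls (pvKey s ord) m + (if pvKey s ord (m + 1) ≠ pvKey s ord m then 1 else 0)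
      from rfl, ← ihm]
    split_ifs <;> push_cast <;> ring

-- counting the boundaries ≤ i over the whole boundary list
lemma pvBnd_count (s : List Char) (ord : List Int) (hlen : s.length ≤ ord.length)
    (i : Nat) (hi : i < s.length) :
    (((pvBnd s ord).countP (fun b => decide (b ≤ (i : Int))) : Nat) : Int)
      = pvCls (pvKey s ord) i := by
  rw [pvBnd, List.countP_filter]
  rw [PySem.List.pyRange_one_append 1 ((i : Int) + 1) (s.length : Int) (by omega) (by omega),
    List.countP_append]
  have hz : List.countP
      (fun a => decide (a ≤ (i : Int)) && decide (PySem.List.pyGetD (pvChars s ord) a ' '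
          ≠ PySem.List.pyGetD (pvChars s ord) (a - 1) ' '))
      (PySem.List.pyRange ((i : Int) + 1) (s.length : Int) 1) = 0 := by
    apply List.countP_eq_zero.mpr
    intro a ha
    have := PySem.List.mem_pyRange_one.mp ha
    have hfalse : decide (a ≤ (i : Int)) = false := by simp; omega
    simp [hfalse]
  have hc : List.countP
      (fun a => decide (a ≤ (i : Int)) && decide (PySem.List.pyGetD (pvChars s ord) a ' '
          ≠ PySem.List.pyGetD (pvChars s ord) (a - 1) ' '))
      (PySem.List.pyRange 1 ((i : Int) + 1) 1)
      = List.countP (fun a => decide (PySem.List.pyGetD (pvChars s ord) a ' '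
          ≠ PySem.List.pyGetD (pvChars s ord) (a - 1) ' '))
        (PySem.List.pyRange 1 ((i : Int) + 1) 1) := by
    apply List.countP_congr
    intro a ha
    have := PySem.List.mem_pyRange_one.mp ha
    have htrue : decide (a ≤ (i : Int)) = true := by simp; omega
    simp [htrue]
  rw [hz, hc, Nat.add_zero]
  exact pvCnt_range s ord hlen i hi

-- B's class of sorted position k equals A's rank
lemma pvClsB_eq (s : List Char) (ord : List Int) (hlen : s.length ≤ ord.length)
    (k : Nat) (hk : k < s.length) :
    ((pvBsr (pvBnd s ord) (k : Int) 0 (pvBnd s ord).length : Nat) : Int)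
      = pvCls (pvKey s ord) k := by
  rw [pvBsr_count (pvBnd s ord) (k : Int) (pvBnd_sorted s ord)]
  exact pvBnd_count s ord hlen k hk

-- B's enumerate/scatter loop is pvScatter of B's class function
lemma pvB_loop (s : List Char) (ord : List Int) (hlen : s.length ≤ ord.length) :
    (PySem.List.enumerate (ord.take s.length)).foldl
      (fun cc io => PySem.List.pySetD cc io.2
        ((pvBsr (pvBnd s ord) io.1 0 (pvBnd s ord).length : Nat) : Int))
      (List.replicate s.length (0 : Int))
      = pvScatter s.length ord
          (fun k => ((pvBsr (pvBnd s ord) (k : Int) 0 (pvBnd s ord).length : Nat) : Int))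
          s.length := by
  have hl : (ord.take s.length).length = s.length := by simp; omega
  rw [PySem.List.enumerate_eq_map_pyRange (ord.take s.length) 0, List.foldl_map]
  rw [show PySem.List.len (ord.take s.length) = ((s.length : Nat) : Int) by
    simp [PySem.List.len_eq, hl]]
  rw [PySem.List.pyRange_zero_nat, List.foldl_map]
  rw [pvScatter]
  apply PySem.List.foldl_congr_mem
  intro acc k hkmem
  have hk : k < s.length := List.mem_range.mp hkmem
  have hio : k < ord.length := lt_of_lt_of_le hk hlen
  have hget : PySem.List.pyGetD (ord.take s.length) (k : Int) 0 = ord.getD k 0 := by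
    rw [PySem.List.pyGetD_natCast, List.getD_eq_getElem?_getD, List.getElem?_take, if_pos hk,
      List.getElem?_eq_getElem hio, List.getD_eq_getElem?_getD, List.getElem?_eq_getElem hio]
  rw [hget]

-- ===== VERDICT (by name: the statement is the Claim_ definition above) =====
theorem compute_char_classes_spec : Claim_equal_compute_char_classes := by
  intro string order _ hpre
  obtain ⟨hne, hlen, hin⟩ := hpre
  have hn1 : 1 ≤ string.toList.length := List.length_pos_of_ne_nil hne
  unfold Spec_compute_char_classes compute_char_classes compute_char_classes_alt
  simp only [PySem.List.slice_to_natCast]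
  rw [pvA_loop string.toList order hlen hin string.toList.length hn1 le_rfl]
  rw [show ((order.take string.toList.length).map
        (fun o => PySem.List.pyGetD string.toList o ' ')) = pvChars string.toList order
    from rfl]
  rw [show ((PySem.List.pyRange 1 (string.toList.length : Int) 1).filter
        (fun i => decide (PySem.List.pyGetD (pvChars string.toList order) i ' '
          ≠ PySem.List.pyGetD (pvChars string.toList order) (i - 1) ' ')))
      = pvBnd string.toList order from rfl]
  rw [pvB_loop string.toList order hlen]
  rw [pvScatter, pvScatter]
  apply PySem.List.foldl_congr_mem
  intro acc k hkmem
  rw [pvClsB_eq string.toList order hlen k (List.mem_range.mp hkmem)]
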